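-- pv_equiv track=rewrite | github.com/Bakatora000/tolabot | windows_bot/bot_logic.py | extract_active_viewer_thread
-- ===== SOURCE A (Python) =====
-- def extract_active_viewer_thread(turns: list[dict]) -> list[dict]:
--     last_bot_reply_index = -1
--     for index, turn in enumerate(turns):
--         if turn.get("bot_reply", ""):
--             last_bot_reply_index = index
--
--     active_turns = turns[last_bot_reply_index + 1:]
--     if not active_turns:
--         return active_turns
--
--     if active_turns[-1].get("thread_boundary", "") == "end":
--         return []
--
--     trimmed_reversed = []
--     for turn in reversed(active_turns):
--         boundary = turn.get("thread_boundary", "")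
--         if boundary == "end":
--             break
--
--         trimmed_reversed.append(turn)
--         if boundary == "start":
--             break
--
--     return list(reversed(trimmed_reversed))
-- ===== SOURCE B (Python) =====
-- def extract_active_viewer_thread(turns: list[dict]) -> list[dict]:
--     last_bot_reply_index = -1
--     for index, turn in enumerate(turns):
--         if turn.get("bot_reply", ""):
--             last_bot_reply_index = index
--
--     active = turns[last_bot_reply_index + 1:]
--
--     # One forward pass: index where the kept suffix starts ('start' inclusive,
--     # 'end' exclusive, last boundary wins); one slice at the end.
--     start = 0
--     for i, turn in enumerate(active):
--         boundary = turn.get("thread_boundary", "")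
--         if boundary == "start":
--             start = i
--         elif boundary == "end":
--             start = i + 1
--     return active[start:]
-- ===== Notes on version B (the rewrite author's own statement) =====
-- stated objective: simpler
-- what changed: Replaces the reversed accumulate-until-break loop (and the redundant trailing-'end' special case) with a single forward pass that records where the kept suffix starts ('start' keeps the index, 'end' skips past it, last boundary wins) followed by one slice.
import Mathlib
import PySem

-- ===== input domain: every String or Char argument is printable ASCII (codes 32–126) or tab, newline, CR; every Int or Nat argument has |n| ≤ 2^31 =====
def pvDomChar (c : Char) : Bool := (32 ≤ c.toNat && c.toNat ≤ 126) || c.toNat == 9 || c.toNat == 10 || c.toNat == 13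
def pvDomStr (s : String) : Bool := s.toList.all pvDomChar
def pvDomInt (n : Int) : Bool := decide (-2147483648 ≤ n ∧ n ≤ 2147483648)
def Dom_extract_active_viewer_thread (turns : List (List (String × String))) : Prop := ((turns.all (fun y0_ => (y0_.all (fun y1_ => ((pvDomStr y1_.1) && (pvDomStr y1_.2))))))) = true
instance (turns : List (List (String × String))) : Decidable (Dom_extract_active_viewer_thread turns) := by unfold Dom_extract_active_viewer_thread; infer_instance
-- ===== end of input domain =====

-- B replaces A's reversed accumulate-until-break loop (and its trailing-'end' special case)
-- with one forward pass recording where the kept suffix starts, then a single slice (simpler).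

-- ===== PORT A =====
-- turn.get(k, "") on a dict[str, str]
def pvGetKey (t : List (String × String)) (k : String) : String :=
  (PySem.Dict.mk t).getD k ""

-- the 'for turn in reversed(active_turns): …' loop of A, with its two breaks;
-- returns trimmed_reversed (elements in traversal order, i.e. reversed)
def pvTrimRev : List (List (String × String)) → List (List (String × String))
  | [] => []
  | t :: rest =>
    let boundary := pvGetKey t "thread_boundary"
    if boundary = "end" then []
    else if boundary = "start" then [t]
    else t :: pvTrimRev rest

def extract_active_viewer_thread (turns : List (List (String × String))) : List (List (String × String)) :=
  let last_bot_reply_index :=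
    (PySem.List.enumerate turns 0).foldl
      (fun acc p => if pvGetKey p.2 "bot_reply" ≠ "" then p.1 else acc) (-1)
  let active_turns := PySem.List.slice turns (some (last_bot_reply_index + 1)) none
  if active_turns = [] then active_turns
  else if pvGetKey (PySem.List.pyGetD active_turns (-1) []) "thread_boundary" = "end" then []
  else (pvTrimRev active_turns.reverse).reverse

-- ===== PORT B =====
def extract_active_viewer_thread_alt (turns : List (List (String × String))) : List (List (String × String)) :=
  let last_bot_reply_index :=
    (PySem.List.enumerate turns 0).foldl
      (fun acc p => if pvGetKey p.2 "bot_reply" ≠ "" then p.1 else acc) (-1)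
  let active := PySem.List.slice turns (some (last_bot_reply_index + 1)) none
  let start :=
    (PySem.List.enumerate active 0).foldl
      (fun acc p =>
        let boundary := pvGetKey p.2 "thread_boundary"
        if boundary = "start" then p.1
        else if boundary = "end" then p.1 + 1
        else acc) 0
  PySem.List.slice active (some start) none

-- ===== PRECONDITION & SPEC =====
def Spec_extract_active_viewer_thread (turns : List (List (String × String))) (out : List (List (String × String))) : Prop := out = extract_active_viewer_thread_alt turns
instance (turns : List (List (String × String))) (out : List (List (String × String))) : Decidable (Spec_extract_active_viewer_thread turns out) := by unfold Spec_extract_active_viewer_thread; infer_instance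

-- ===== CLAIM (what is proved, stated in full; the proofs are below) =====
def Claim_equal_extract_active_viewer_thread : Prop := ∀ (turns : List (List (String × String))), Dom_extract_active_viewer_thread turns → Spec_extract_active_viewer_thread turns (extract_active_viewer_thread turns)

-- ===== LEMMAS AND PROOFS =====

-- B's second loop, as a function of the active suffix
def pvStart (xs : List (List (String × String))) : Int :=
  (PySem.List.enumerate xs 0).foldl
    (fun acc p =>
      let boundary := pvGetKey p.2 "thread_boundary"
      if boundary = "start" then p.1
      else if boundary = "end" then p.1 + 1
      else acc) 0

-- small unfolding facts for A's loop
theorem pvTrimRev_cons_end {t : List (String × String)} {r : List (List (String × String))}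
    (he : pvGetKey t "thread_boundary" = "end") : pvTrimRev (t :: r) = [] := by
  simp [pvTrimRev, he]

theorem pvTrimRev_cons_start {t : List (String × String)} {r : List (List (String × String))}
    (hs : pvGetKey t "thread_boundary" = "start") :
    pvTrimRev (t :: r) = [t] := by
  simp [pvTrimRev, hs]

theorem pvTrimRev_cons_other {t : List (String × String)} {r : List (List (String × String))}
    (he : pvGetKey t "thread_boundary" ≠ "end") (hs : pvGetKey t "thread_boundary" ≠ "start") :
    pvTrimRev (t :: r) = t :: pvTrimRev r := by
  simp [pvTrimRev, he, hs]

-- core invariant: B's start index is in range and dropping it yields exactly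
-- A's trimmed-and-re-reversed list
theorem pvStart_drop (xs : List (List (String × String))) :
    0 ≤ pvStart xs ∧ pvStart xs ≤ xs.length ∧
      xs.drop (pvStart xs).toNat = (pvTrimRev xs.reverse).reverse := by
  induction xs using List.reverseRecOn with
  | nil => simp [pvStart, PySem.List.enumerate, pvTrimRev]
  | append_singleton ys t ih =>
    obtain ⟨h0, hle, hdrop⟩ := ih
    have henum : PySem.List.enumerate (ys ++ [t]) 0
        = PySem.List.enumerate ys 0 ++ [((ys.length : Int), t)] := by
      simp [PySem.List.enumerate_append]
    have hstep : pvStart (ys ++ [t]) =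
        (if pvGetKey t "thread_boundary" = "start" then (ys.length : Int)
         else if pvGetKey t "thread_boundary" = "end" then (ys.length : Int) + 1
         else pvStart ys) := by
      simp only [pvStart, henum, List.foldl_append, List.foldl_cons, List.foldl_nil]
    have hrev : (ys ++ [t]).reverse = t :: ys.reverse := by simp
    by_cases hs : pvGetKey t "thread_boundary" = "start"
    · have hstart' : pvStart (ys ++ [t]) = (ys.length : Int) := by rw [hstep, if_pos hs]
      refine ⟨by rw [hstart']; positivity, by rw [hstart']; simp, ?_⟩
      rw [hstart', hrev, pvTrimRev_cons_start hs]
      simp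
    · by_cases he : pvGetKey t "thread_boundary" = "end"
      · have hstart' : pvStart (ys ++ [t]) = (ys.length : Int) + 1 := by
          rw [hstep, if_neg hs, if_pos he]
        refine ⟨by rw [hstart']; positivity, by rw [hstart']; simp, ?_⟩
        rw [hstart', hrev, pvTrimRev_cons_end he]
        have hn : ((ys.length : Int) + 1).toNat = ys.length + 1 := by omega
        simp [hn]
      · have hstart' : pvStart (ys ++ [t]) = pvStart ys := by
          rw [hstep, if_neg hs, if_neg he]
        refine ⟨by rw [hstart']; exact h0, ?_, ?_⟩
        · rw [hstart']
          simp only [List.length_append, List.length_cons, List.length_nil]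
          push_cast
          omega
        · rw [hstart', hrev, pvTrimRev_cons_other he hs]
          have hnat : (pvStart ys).toNat ≤ ys.length := by omega
          rw [List.reverse_cons, List.drop_append_of_le_length hnat, hdrop]

-- A's tail processing equals drop of B's start index, for every active suffix
theorem pvTail_eq (xs : List (List (String × String))) :
    (if xs = [] then xs
     else if pvGetKey (PySem.List.pyGetD xs (-1) []) "thread_boundary" = "end" then []
     else (pvTrimRev xs.reverse).reverse)
    = PySem.List.slice xs (some (pvStart xs)) none := by
  obtain ⟨h0, hle, hdrop⟩ := pvStart_drop xs
  rw [PySem.List.slice_from xs h0, hdrop]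
  induction xs using List.reverseRecOn with
  | nil => simp [pvTrimRev]
  | append_singleton ys t _ =>
    have hne : ys ++ [t] ≠ [] := by simp
    rw [if_neg hne, PySem.List.pyGetD_neg_one_append_singleton]
    have hrev : (ys ++ [t]).reverse = t :: ys.reverse := by simp
    by_cases he : pvGetKey t "thread_boundary" = "end"
    · rw [if_pos he, hrev]
      simp [pvTrimRev, he]
    · rw [if_neg he]

-- ===== VERDICT (by name: the statement is the Claim_ definition above) =====
theorem extract_active_viewer_thread_spec : Claim_equal_extract_active_viewer_thread := by
  intro turns _
  unfold Spec_extract_active_viewer_thread extract_active_viewer_thread extract_active_viewer_thread_alt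
  simp only []
  exact (pvTail_eq _).symm ▸ rfl
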